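-- pv_equiv track=rewrite | github.com/axatjpr/photometa-restore | photometa_restore/utils/file_operations.py | check_if_same_name
-- ===== SOURCE A (Python) =====
-- from typing import Optional, List, Tuple
--
-- def check_if_same_name(title: str, title_fixed: str, media_moved: List[str], recursion_time: int) -> str:
--     """Recursively check if a file name already exists in moved media and append suffix if needed.
--
--     Args:
--         title: Original file title.
--         title_fixed: Fixed file title (may have already been processed).
--         media_moved: List of already moved media files.
--         recursion_time: Counter for recursion to append to filename.
--
--     Returns:
--         Unique file name.
--     """
--     if title_fixed in media_moved:
--         # Split the title into name and extension (if any)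
--         parts = title.rsplit('.', 1) if '.' in title else [title, '']
--
--         if len(parts) == 2:
--             name, ext = parts
--             title_fixed = f"{name}({recursion_time}).{ext}"
--         else:
--             name = parts[0]
--             title_fixed = f"{name}({recursion_time})"
--
--         return check_if_same_name(title, title_fixed, media_moved, recursion_time + 1)
--     else:
--         return title_fixed
-- ===== SOURCE B (Python) =====
-- def check_if_same_name(title: str, title_fixed: str, media_moved, recursion_time: int) -> str:
--     # Split the original title once, outside the loop (A redoes it on every recursive call).
--     if '.' in title:
--         name, ext = title.rsplit('.', 1)
--     else:
--         name, ext = title, ''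
--     # In A, `parts` always has length 2 (even the no-dot case builds [title, '']),
--     # so the suffix format is always f"{name}({n}).{ext}"; the else branch is dead code.
--     while title_fixed in media_moved:
--         title_fixed = f"{name}({recursion_time}).{ext}"
--         recursion_time += 1
--     return title_fixed
-- ===== Notes on version B (the rewrite author's own statement) =====
-- stated objective: simpler
-- what changed: Replaces A's recursion (which re-splits the title on every call and carries a dead else branch) with a single split of the original title followed by an iterative while loop that rebuilds the candidate name; A's unreachable no-extension branch is dropped.
import Mathlib
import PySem

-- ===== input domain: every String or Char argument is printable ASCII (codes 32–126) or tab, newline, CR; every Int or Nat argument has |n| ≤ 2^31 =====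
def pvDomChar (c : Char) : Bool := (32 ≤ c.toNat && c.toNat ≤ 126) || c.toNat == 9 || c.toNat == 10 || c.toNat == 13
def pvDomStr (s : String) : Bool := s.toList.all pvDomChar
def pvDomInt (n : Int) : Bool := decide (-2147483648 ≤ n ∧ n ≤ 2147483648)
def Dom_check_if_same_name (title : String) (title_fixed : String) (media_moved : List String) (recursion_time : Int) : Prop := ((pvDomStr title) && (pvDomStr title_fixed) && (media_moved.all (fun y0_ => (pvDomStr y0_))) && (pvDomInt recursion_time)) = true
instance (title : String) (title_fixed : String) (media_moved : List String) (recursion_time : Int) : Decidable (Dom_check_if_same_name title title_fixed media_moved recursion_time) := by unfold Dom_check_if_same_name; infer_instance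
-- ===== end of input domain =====

-- B hoists the title split out of A's recursion, turns it into an iterative loop,
-- and drops A's dead no-extension branch; return values are identical (objective: simpler).


-- ===== PORT A =====
-- `title.rsplit('.', 1)` when '.' ∈ title: split at the LAST '.'; none when no '.'.
def pvRsplitDot : List Char → Option (List Char × List Char)
  | [] => none
  | c :: rest =>
    match pvRsplitDot rest with
    | some (a, b) => some (c :: a, b)
    | none => if c = '.' then some ([], rest) else none

-- The recursion of A, with fuel (the loop runs at most media_moved.length + 1 times,
-- since successive candidate names are pairwise distinct strings; fuel only makes it total).
def check_if_same_name_go (title : String) (media_moved : List String) :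
    Nat → String → Int → String
  | 0, title_fixed, _ => title_fixed
  | fuel + 1, title_fixed, recursion_time =>
    if media_moved.contains title_fixed then
      let parts : List String :=
        match pvRsplitDot title.toList with
        | some (a, b) => [String.ofList a, String.ofList b]
        | none => [title, ""]
      if parts.length = 2 then
        let name := parts.getD 0 ""
        let ext := parts.getD 1 ""
        check_if_same_name_go title media_moved fuel
          (name ++ "(" ++ PySem.Int.toStr recursion_time ++ ")." ++ ext) (recursion_time + 1)
      else
        let name := parts.getD 0 ""
        check_if_same_name_go title media_moved fuel
          (name ++ "(" ++ PySem.Int.toStr recursion_time ++ ")") (recursion_time + 1)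
    else title_fixed

def check_if_same_name (title : String) (title_fixed : String) (media_moved : List String) (recursion_time : Int) : String :=
  check_if_same_name_go title media_moved (media_moved.length + 2) title_fixed recursion_time

-- ===== PORT B =====
-- B's while loop, with the same fuel bound.
def check_if_same_name_altLoop (name ext : String) (media_moved : List String) :
    Nat → String → Int → String
  | 0, title_fixed, _ => title_fixed
  | fuel + 1, title_fixed, recursion_time =>
    if media_moved.contains title_fixed then
      check_if_same_name_altLoop name ext media_moved fuel
        (name ++ "(" ++ PySem.Int.toStr recursion_time ++ ")." ++ ext) (recursion_time + 1)
    else title_fixed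

def check_if_same_name_alt (title : String) (title_fixed : String) (media_moved : List String) (recursion_time : Int) : String :=
  let ne : String × String :=
    match pvRsplitDot title.toList with
    | some (a, b) => (String.ofList a, String.ofList b)
    | none => (title, "")
  check_if_same_name_altLoop ne.1 ne.2 media_moved (media_moved.length + 2) title_fixed recursion_time

-- ===== PRECONDITION & SPEC =====
def Spec_check_if_same_name (title : String) (title_fixed : String) (media_moved : List String) (recursion_time : Int) (out : String) : Prop := out = check_if_same_name_alt title title_fixed media_moved recursion_time
instance (title : String) (title_fixed : String) (media_moved : List String) (recursion_time : Int) (out : String) : Decidable (Spec_check_if_same_name title title_fixed media_moved recursion_time out) := by unfold Spec_check_if_same_name; infer_instance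

-- ===== CLAIM (what is proved, stated in full; the proofs are below) =====
def Claim_equal_check_if_same_name : Prop := ∀ (title : String) (title_fixed : String) (media_moved : List String) (recursion_time : Int), Dom_check_if_same_name title title_fixed media_moved recursion_time → Spec_check_if_same_name title title_fixed media_moved recursion_time (check_if_same_name title title_fixed media_moved recursion_time)

-- ===== LEMMAS AND PROOFS =====
theorem go_eq_altLoop (title : String) (media_moved : List String) (name ext : String)
    (h : (match pvRsplitDot title.toList with
          | some (a, b) => ((String.ofList a : String), (String.ofList b : String))
          | none => (title, "")) = (name, ext)) :
    ∀ (fuel : Nat) (title_fixed : String) (recursion_time : Int),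
      check_if_same_name_go title media_moved fuel title_fixed recursion_time =
      check_if_same_name_altLoop name ext media_moved fuel title_fixed recursion_time := by
  intro fuel
  induction fuel with
  | zero => intro tf r; rfl
  | succ n ih =>
    intro tf r
    cases hsplit : pvRsplitDot title.toList with
    | some p =>
      obtain ⟨a, b⟩ := p
      rw [hsplit] at h
      simp only [Prod.mk.injEq] at h
      obtain ⟨rfl, rfl⟩ := h
      simp only [check_if_same_name_go, check_if_same_name_altLoop, hsplit,
        List.length_cons, List.length_nil, Nat.reduceAdd, if_pos, List.getD]
      split_ifs with hc
      · simpa using ih _ _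
      · rfl
    | none =>
      rw [hsplit] at h
      simp only [Prod.mk.injEq] at h
      obtain ⟨rfl, rfl⟩ := h
      simp only [check_if_same_name_go, check_if_same_name_altLoop, hsplit,
        List.length_cons, List.length_nil, Nat.reduceAdd, if_pos, List.getD]
      split_ifs with hc
      · simpa using ih _ _
      · rfl

-- ===== VERDICT (by name: the statement is the Claim_ definition above) =====
theorem check_if_same_name_spec : Claim_equal_check_if_same_name := by
  intro title title_fixed media_moved recursion_time _
  unfold Spec_check_if_same_name check_if_same_name check_if_same_name_alt
  cases hsplit : pvRsplitDot title.toList with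
  | some p =>
    exact go_eq_altLoop title media_moved _ _ (by simp [hsplit]) _ _ _
  | none =>
    exact go_eq_altLoop title media_moved _ _ (by simp [hsplit]) _ _ _
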